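-- pv_equiv track=rewrite | github.com/ADAM-Bench/Repo | src/reviewground/llm_extract.py | _normalize_with_map
-- ===== SOURCE A (Python) =====
-- from typing import Any, Dict, List
--
-- def _normalize_with_map(text: str) -> tuple[str, List[int]]:
--     out_chars: List[str] = []
--     mapping: List[int] = []
--     in_ws = False
--     for idx, ch in enumerate(text):
--         if ch.isspace():
--             if not in_ws:
--                 out_chars.append(" ")
--                 mapping.append(idx)
--                 in_ws = True
--             continue
--         out_chars.append(ch)
--         mapping.append(idx)
--         in_ws = False
--     return "".join(out_chars), mapping
-- ===== SOURCE B (Python) =====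
-- from typing import List
--
-- def _normalize_with_map(text: str) -> tuple[str, List[int]]:
--     # Run-based scan: jump over whole whitespace / non-whitespace runs.
--     out_chars: List[str] = []
--     mapping: List[int] = []
--     i = 0
--     n = len(text)
--     while i < n:
--         if text[i].isspace():
--             out_chars.append(" ")
--             mapping.append(i)
--             i += 1
--             while i < n and text[i].isspace():
--                 i += 1
--         else:
--             j = i + 1
--             while j < n and not text[j].isspace():
--                 j += 1
--             out_chars.append(text[i:j])
--             mapping.extend(range(i, j))
--             i = j
--     return "".join(out_chars), mapping
-- ===== Notes on version B (the rewrite author's own statement) =====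
-- stated objective: alternative
-- what changed: A walks the string character by character carrying an in_ws flag; B scans run by run with nested while-loops, emitting a whole non-whitespace run (and its index range) or a single space per whitespace run at once.
import Mathlib
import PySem

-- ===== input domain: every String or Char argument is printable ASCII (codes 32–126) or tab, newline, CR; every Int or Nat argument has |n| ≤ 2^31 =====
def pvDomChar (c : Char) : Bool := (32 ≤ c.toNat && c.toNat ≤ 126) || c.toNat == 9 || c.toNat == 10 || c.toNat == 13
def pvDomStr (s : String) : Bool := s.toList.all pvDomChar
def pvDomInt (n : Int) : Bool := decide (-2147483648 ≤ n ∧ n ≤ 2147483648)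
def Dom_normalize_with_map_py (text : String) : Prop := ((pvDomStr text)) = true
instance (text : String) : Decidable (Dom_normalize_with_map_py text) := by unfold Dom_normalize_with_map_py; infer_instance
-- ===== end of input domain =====

-- B replaces A's per-character loop with a per-run scan (whole whitespace/word runs at a time); objective: alternative decomposition, same O(n) cost.

-- ===== PORT A =====
-- 'for idx, ch in enumerate(text)': foldl over the enumerated characters with
-- append-at-end accumulators (out_chars, mapping, in_ws), branches in source order.
def normalize_with_map_py (text : String) : String × List Int :=
  let st := (PySem.List.enumerate text.toList 0).foldl
    (fun (st : List Char × List Int × Bool) p =>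
      if PySem.Chars.isspace p.2 then
        if !st.2.2 then (st.1 ++ [' '], st.2.1 ++ [p.1], true) else st
      else (st.1 ++ [p.2], st.2.1 ++ [p.1], false))
    ([], [], false)
  (String.ofList st.1, st.2.1)

-- ===== PORT B =====
-- 'mapping.extend(range(i, j))' with 0 ≤ i ≤ j: the list [i, i+1, …, j-1] (exact here).
def nwmIdx (s : Int) (n : Nat) : List Int :=
  (List.range n).map (fun (k : Nat) => s + (k : Int))

-- B's outer while-loop: each step consumes one whole run starting at index i.
-- The inner 'while … isspace: i += 1' / 'while … not isspace: j += 1' loops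
-- become takeWhile/dropWhile on the remainder of the character list.
def nwmB_go (l : List Char) (i : Int) : List Char × List Int :=
  match l with
  | [] => ([], [])
  | c :: cs =>
    if PySem.Chars.isspace c then
      let skip := cs.takeWhile (fun x => PySem.Chars.isspace x)
      let rest := cs.dropWhile (fun x => PySem.Chars.isspace x)
      let r := nwmB_go rest (i + 1 + skip.length)
      (' ' :: r.1, i :: r.2)
    else
      let run := cs.takeWhile (fun x => !PySem.Chars.isspace x)
      let rest := cs.dropWhile (fun x => !PySem.Chars.isspace x)
      let r := nwmB_go rest (i + 1 + run.length)
      (c :: run ++ r.1, nwmIdx i (run.length + 1) ++ r.2)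
  termination_by l.length
  decreasing_by
    all_goals
      simpa using Nat.lt_succ_of_le (List.length_dropWhile_le _ _)

def normalize_with_map_py_alt (text : String) : String × List Int :=
  let r := nwmB_go text.toList 0
  (String.ofList r.1, r.2)

-- ===== PRECONDITION & SPEC =====
def Spec_normalize_with_map_py (text : String) (out : String × List Int) : Prop := out = normalize_with_map_py_alt text
instance (text : String) (out : String × List Int) : Decidable (Spec_normalize_with_map_py text out) := by unfold Spec_normalize_with_map_py; infer_instance

-- ===== CLAIM (what is proved, stated in full; the proofs are below) =====
def Claim_equal_normalize_with_map_py : Prop := ∀ (text : String), Dom_normalize_with_map_py text → Spec_normalize_with_map_py text (normalize_with_map_py text)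

-- ===== LEMMAS AND PROOFS =====

theorem nwmIdx_succ (s : Int) (n : Nat) : nwmIdx s (n + 1) = s :: nwmIdx (s + 1) n := by
  unfold nwmIdx
  rw [List.range_succ_eq_map, List.map_cons, List.map_map]
  refine congrArg₂ List.cons (by simp) ?_
  apply List.map_congr_left
  intro k _
  simp only [Function.comp_apply]
  push_cast
  ring

theorem nwmB_go_cons_space (c : Char) (cs : List Char) (i : Int)
    (hc : PySem.Chars.isspace c = true) :
    nwmB_go (c :: cs) i
      = (' ' :: (nwmB_go (cs.dropWhile (fun x => PySem.Chars.isspace x))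
            (i + 1 + (cs.takeWhile (fun x => PySem.Chars.isspace x)).length)).1,
         i :: (nwmB_go (cs.dropWhile (fun x => PySem.Chars.isspace x))
            (i + 1 + (cs.takeWhile (fun x => PySem.Chars.isspace x)).length)).2) := by
  rw [nwmB_go.eq_def]
  simp [hc]

theorem nwmB_go_cons_word (c : Char) (cs : List Char) (i : Int)
    (hc : PySem.Chars.isspace c = false) :
    nwmB_go (c :: cs) i
      = (c :: cs.takeWhile (fun x => !PySem.Chars.isspace x)
            ++ (nwmB_go (cs.dropWhile (fun x => !PySem.Chars.isspace x))
                (i + 1 + (cs.takeWhile (fun x => !PySem.Chars.isspace x)).length)).1,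
         nwmIdx i ((cs.takeWhile (fun x => !PySem.Chars.isspace x)).length + 1)
            ++ (nwmB_go (cs.dropWhile (fun x => !PySem.Chars.isspace x))
                (i + 1 + (cs.takeWhile (fun x => !PySem.Chars.isspace x)).length)).2) := by
  rw [nwmB_go.eq_def]
  simp [hc]

-- Recursive form of A's loop body (suffix contribution from state in_ws = ws at index s).
def nwmA_rec (l : List Char) (s : Int) (ws : Bool) : List Char × List Int × Bool :=
  match l with
  | [] => ([], [], ws)
  | c :: cs =>
    if PySem.Chars.isspace c then
      if !ws then
        let r := nwmA_rec cs (s + 1) true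
        (' ' :: r.1, s :: r.2.1, r.2.2)
      else nwmA_rec cs (s + 1) true
    else
      let r := nwmA_rec cs (s + 1) false
      (c :: r.1, s :: r.2.1, r.2.2)

-- A's foldl with append accumulators = accumulators ++ nwmA_rec of the suffix.
theorem nwmA_foldl_eq (l : List Char) (s : Int) (out : List Char) (m : List Int) (ws : Bool) :
    (PySem.List.enumerate l s).foldl
      (fun (st : List Char × List Int × Bool) p =>
        if PySem.Chars.isspace p.2 then
          if !st.2.2 then (st.1 ++ [' '], st.2.1 ++ [p.1], true) else st
        else (st.1 ++ [p.2], st.2.1 ++ [p.1], false))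
      (out, m, ws)
    = (out ++ (nwmA_rec l s ws).1, m ++ (nwmA_rec l s ws).2.1, (nwmA_rec l s ws).2.2) := by
  induction l generalizing s out m ws with
  | nil => simp [nwmA_rec, PySem.List.enumerate_nil]
  | cons c cs ih =>
    rw [PySem.List.enumerate_cons, List.foldl_cons]
    by_cases hc : PySem.Chars.isspace c
    · cases ws with
      | false =>
        simp only [hc, Bool.not_false, if_true]
        rw [ih]
        simp [nwmA_rec, hc]
      | true =>
        simp only [hc, Bool.not_true, if_true, if_false, Bool.false_eq_true]
        rw [ih]
        simp [nwmA_rec, hc]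
    · simp only [hc, if_false, Bool.false_eq_true]
      rw [ih]
      simp [nwmA_rec, hc]

def nwmP (l : List Char) (s : Int) (ws : Bool) : List Char × List Int :=
  ((nwmA_rec l s ws).1, (nwmA_rec l s ws).2.1)

-- in whitespace state, A skips the whole whitespace run
theorem nwmP_skip (l : List Char) (s : Int) :
    nwmP l s true
      = nwmP (l.dropWhile (fun x => PySem.Chars.isspace x)) (s + (l.takeWhile (fun x => PySem.Chars.isspace x)).length) true := by
  induction l generalizing s with
  | nil => simp
  | cons c cs ih =>
    by_cases hc : PySem.Chars.isspace c
    · rw [show nwmP (c :: cs) s true = nwmP cs (s + 1) true by simp [nwmP, nwmA_rec, hc]]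
      rw [ih]
      rw [List.takeWhile_cons_of_pos (by simpa using hc), List.dropWhile_cons_of_pos (by simpa using hc)]
      congr 1
      push_cast [List.length_cons]
      ring
    · simp [hc]

-- after a word run (or at the end) the in_ws flag is irrelevant for the pair
theorem nwmP_ws_irrel (l : List Char) (s : Int)
    (h : l = [] ∨ ∃ c cs, l = c :: cs ∧ PySem.Chars.isspace c = false) :
    nwmP l s true = nwmP l s false := by
  rcases h with h | ⟨c, cs, rfl, hc⟩
  · subst h; simp [nwmP, nwmA_rec]
  · simp [nwmP, nwmA_rec, hc]

-- A consumes a non-whitespace run character by character, producing what B emits at once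
theorem nwmP_run (run : List Char) (hrun : ∀ c ∈ run, PySem.Chars.isspace c = false)
    (rest : List Char) (s : Int) :
    nwmP (run ++ rest) s false
      = (run ++ (nwmP rest (s + run.length) false).1,
         nwmIdx s run.length ++ (nwmP rest (s + run.length) false).2) := by
  induction run generalizing s with
  | nil => simp [nwmIdx]
  | cons c cs ih =>
    have hc : PySem.Chars.isspace c = false := hrun c (by simp)
    have ihs := ih (fun x hx => hrun x (by simp [hx])) (s + 1)
    rw [show (c :: cs) ++ rest = c :: (cs ++ rest) by simp]
    rw [show nwmP (c :: (cs ++ rest)) s false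
          = (c :: (nwmP (cs ++ rest) (s + 1) false).1, s :: (nwmP (cs ++ rest) (s + 1) false).2) by
        simp [nwmP, nwmA_rec, hc]]
    rw [ihs]
    have harith : s + ((cs.length + 1 : Nat) : Int) = s + 1 + (cs.length : Int) := by
      push_cast; ring
    simp only [List.length_cons]
    rw [harith, nwmIdx_succ]
    simp

-- main bridge: A's recursive form (from state in_ws = false) = B's run recursion
theorem nwmP_eq_go (l : List Char) (s : Int) : nwmP l s false = nwmB_go l s := by
  induction hn : l.length using Nat.strong_induction_on generalizing l s with
  | _ n ih =>
  subst hn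
  match l with
  | [] => simp [nwmP, nwmA_rec, nwmB_go]
  | c :: cs =>
    by_cases hc : PySem.Chars.isspace c
    · -- whitespace run
      have h1 : nwmP (c :: cs) s false
          = (' ' :: (nwmP cs (s + 1) true).1, s :: (nwmP cs (s + 1) true).2) := by
        simp [nwmP, nwmA_rec, hc]
      rw [h1, nwmP_skip]
      have hrel : nwmP (cs.dropWhile (fun x => PySem.Chars.isspace x))
            (s + 1 + (cs.takeWhile (fun x => PySem.Chars.isspace x)).length) true
          = nwmP (cs.dropWhile (fun x => PySem.Chars.isspace x))
            (s + 1 + (cs.takeWhile (fun x => PySem.Chars.isspace x)).length) false := by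
        apply nwmP_ws_irrel
        match h : cs.dropWhile (fun x => PySem.Chars.isspace x) with
        | [] => left; rfl
        | d :: ds =>
          right
          refine ⟨d, ds, rfl, ?_⟩
          have := List.head_dropWhile_not (p := fun x => PySem.Chars.isspace x) (l := cs) (by simp [h])
          simpa [h] using this
      have hlen : (cs.dropWhile (fun x => PySem.Chars.isspace x)).length < (c :: cs).length :=
        Nat.lt_succ_of_le (List.length_dropWhile_le _ _)
      rw [hrel, ih _ hlen _ _ rfl]
      rw [nwmB_go_cons_space c cs s hc]
    · -- word run
      have hsplit : cs = cs.takeWhile (fun x => !PySem.Chars.isspace x)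
          ++ cs.dropWhile (fun x => !PySem.Chars.isspace x) :=
        (List.takeWhile_append_dropWhile).symm
      have hall : ∀ x ∈ c :: cs.takeWhile (fun x => !PySem.Chars.isspace x),
          PySem.Chars.isspace x = false := by
        intro x hx
        rcases List.mem_cons.mp hx with rfl | hx
        · simpa using hc
        · simpa using List.mem_takeWhile_imp hx
      rw [show c :: cs = (c :: cs.takeWhile (fun x => !PySem.Chars.isspace x))
              ++ cs.dropWhile (fun x => !PySem.Chars.isspace x) by
        rw [List.cons_append, ← hsplit]]
      rw [nwmP_run _ hall _ s]
      have hlen : (cs.dropWhile (fun x => !PySem.Chars.isspace x)).length < (c :: cs).length :=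
        Nat.lt_succ_of_le (List.length_dropWhile_le _ _)
      rw [ih _ hlen _ _ rfl]
      rw [show (c :: cs.takeWhile (fun x => !PySem.Chars.isspace x))
            ++ cs.dropWhile (fun x => !PySem.Chars.isspace x) = c :: cs by
        rw [List.cons_append, ← hsplit]]
      rw [nwmB_go_cons_word c cs s (by simpa using hc)]
      have harith : s + ((((cs.takeWhile (fun x => !PySem.Chars.isspace x)).length + 1 : Nat)) : Int)
          = s + 1 + ((cs.takeWhile (fun x => !PySem.Chars.isspace x)).length : Int) := by
        push_cast; ring
      simp only [List.length_cons]
      rw [harith]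

-- ===== VERDICT (by name: the statement is the Claim_ definition above) =====
theorem normalize_with_map_py_spec : Claim_equal_normalize_with_map_py := by
  intro text _
  unfold Spec_normalize_with_map_py normalize_with_map_py normalize_with_map_py_alt
  rw [nwmA_foldl_eq text.toList 0 [] [] false]
  rw [← nwmP_eq_go text.toList 0]
  simp [nwmP]
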